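-- pv_equiv track=rewrite | github.com/Kotagiri0/INfa | егэ17 практическая работа/егэ17 практическая работа/main.py | d
-- ===== SOURCE A (Python) =====
-- def d(x):
--     x = str(abs(x))
--     tmp1 = 0
--     tmp2 = 0
--     for i in x:
--         if(int(i)%2==0):
--             tmp1+=1
--         else:
--             tmp2+=1
--     if(tmp1==tmp2):
--         return True
--     return False
-- ===== SOURCE B (Python) =====
-- def d(x):
--     # Arithmetic digit extraction: no string conversion at all.  A single signed
--     # balance (+1 per even digit, -1 per odd digit) over the digits obtained by
--     # repeated division by ten; the counts are equal iff the balance is zero.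
--     def bal(n):
--         b = 1 if n % 10 % 2 == 0 else -1
--         return b if n < 10 else b + bal(n // 10)
--     return bal(abs(x)) == 0
-- ===== Notes on version B (the rewrite author's own statement) =====
-- stated objective: alternative
-- what changed: Drops the string conversion and the two even/odd counters entirely: B extracts digits arithmetically by recursive divmod by ten and keeps a single signed balance (+1 even, -1 odd), returning balance == 0.
import Mathlib
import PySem

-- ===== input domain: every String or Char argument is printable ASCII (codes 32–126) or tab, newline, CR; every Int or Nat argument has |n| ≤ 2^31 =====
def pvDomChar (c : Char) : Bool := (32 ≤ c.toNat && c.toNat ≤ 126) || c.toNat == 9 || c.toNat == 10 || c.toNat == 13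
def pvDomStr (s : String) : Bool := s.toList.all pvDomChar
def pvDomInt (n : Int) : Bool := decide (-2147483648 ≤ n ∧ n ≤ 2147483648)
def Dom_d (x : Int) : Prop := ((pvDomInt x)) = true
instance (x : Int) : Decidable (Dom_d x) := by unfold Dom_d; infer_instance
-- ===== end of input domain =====

-- B replaces A's string conversion and two even/odd counters by arithmetic digit
-- extraction (recursive divmod by ten) with one signed balance (alternative algorithm).

-- ===== PORT A =====
-- int(i) on the single digit character i of str(abs(x)) is ported as its code minus 48,
-- exact because str(abs(x)) consists of decimal digit characters only.
def d (x : Int) : Bool :=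
  let s := PySem.Int.toChars |x|
  let r := s.foldl (fun (t : Int × Int) c =>
      if PySem.Int.mod ((c.toNat : Int) - 48) 2 = 0 then (t.1 + 1, t.2) else (t.1, t.2 + 1)) (0, 0)
  if r.1 = r.2 then true else false

-- ===== PORT B =====
-- bal runs on abs(x), which is nonnegative, so Nat's % and / are exactly Python's % and //.
def dAltBal (n : Nat) : Int :=
  let b : Int := if n % 10 % 2 = 0 then 1 else -1
  if n < 10 then b else b + dAltBal (n / 10)
decreasing_by exact Nat.div_lt_self (by omega) (by omega)

def d_alt (x : Int) : Bool := decide (dAltBal |x|.toNat = 0)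

-- ===== PRECONDITION & SPEC =====
def Spec_d (x : Int) (out : Bool) : Prop := out = d_alt x
instance (x : Int) (out : Bool) : Decidable (Spec_d x out) := by unfold Spec_d; infer_instance

-- ===== CLAIM (what is proved, stated in full; the proofs are below) =====
def Claim_equal_d : Prop := ∀ (x : Int), Dom_d x → Spec_d x (d x)

-- ===== LEMMAS AND PROOFS =====

-- the ±1 contribution of one digit character to the parity balance
def pvBalTerm (c : Char) : Int :=
  if PySem.Int.mod ((c.toNat : Int) - 48) 2 = 0 then 1 else -1

-- unfolding lemmas for B's recursion
lemma dAltBal_lt {n : Nat} (h : n < 10) : dAltBal n = if n % 2 = 0 then 1 else -1 := by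
  rw [dAltBal]
  simp [if_pos h, Nat.mod_eq_of_lt h]

lemma dAltBal_ge {n : Nat} (h : ¬ n < 10) :
    dAltBal n = (if n % 10 % 2 = 0 then (1 : Int) else -1) + dAltBal (n / 10) := by
  rw [dAltBal]
  simp [if_neg h]

-- A's loop computes the even- and odd-digit counts.
lemma d_fold_counts (s : List Char) : ∀ (t1 t2 : Int),
    s.foldl (fun (t : Int × Int) c =>
      if PySem.Int.mod ((c.toNat : Int) - 48) 2 = 0 then (t.1 + 1, t.2) else (t.1, t.2 + 1)) (t1, t2)
    = (t1 + (s.countP (fun c => decide (PySem.Int.mod ((c.toNat : Int) - 48) 2 = 0)) : Int),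
       t2 + (s.countP (fun c => !decide (PySem.Int.mod ((c.toNat : Int) - 48) 2 = 0)) : Int)) := by
  induction s with
  | nil => simp
  | cons c s ih =>
    intro t1 t2
    simp only [List.foldl_cons, List.countP_cons]
    by_cases h : PySem.Int.mod ((c.toNat : Int) - 48) 2 = 0
    · rw [if_pos h, ih]
      simp only [h, decide_true, Bool.not_true, if_true]
      rw [Prod.mk.injEq]; refine ⟨?_, ?_⟩ <;> (simp; try omega)
    · rw [if_neg h, ih]
      simp only [h, decide_false, Bool.not_false, if_true]
      rw [Prod.mk.injEq]; refine ⟨?_, ?_⟩ <;> (simp; try omega)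

-- a ±1 balance over any decidable predicate is yes-count minus no-count
lemma pv_bal_counts (q : Char → Prop) [DecidablePred q] (s : List Char) :
    (s.map (fun c => if q c then (1 : Int) else -1)).sum
    = (s.countP (fun c => decide (q c)) : Int) - (s.countP (fun c => !decide (q c)) : Int) := by
  induction s with
  | nil => simp
  | cons c s ih =>
    simp only [List.map_cons, List.sum_cons, List.countP_cons, ih]
    by_cases h : q c
    · simp only [h, decide_true, Bool.not_true, if_true, Bool.false_eq_true, if_false,
        Nat.add_zero]
      push_cast
      ring
    · simp only [h, decide_false, Bool.not_false, if_false, Bool.false_eq_true, if_true,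
        Nat.add_zero]
      push_cast
      ring

-- the balance of A's digit string is even-count minus odd-count
lemma d_balSum_counts (s : List Char) :
    (s.map pvBalTerm).sum
    = (s.countP (fun c => decide (PySem.Int.mod ((c.toNat : Int) - 48) 2 = 0)) : Int)
      - (s.countP (fun c => !decide (PySem.Int.mod ((c.toNat : Int) - 48) 2 = 0)) : Int) := by
  exact pv_bal_counts (fun c => PySem.Int.mod ((c.toNat : Int) - 48) 2 = 0) s

-- the parity test A applies to the character of a digit k < 10 is k's parity
lemma d_digitChar_parity (k : Nat) (hk : k < 10) :
    pvBalTerm (Nat.digitChar k) = if k % 2 = 0 then 1 else -1 := by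
  unfold pvBalTerm
  interval_cases k <;> decide

-- B's numeric balance equals the balance of A's digit string
lemma d_balSum_toDigits : ∀ (m : Nat), ((Nat.toDigits 10 m).map pvBalTerm).sum = dAltBal m := by
  intro m
  induction m using Nat.strong_induction_on with
  | _ m ih =>
    by_cases h : m < 10
    · rw [Nat.toDigits_of_lt_base h, dAltBal_lt h]
      simp only [List.map_cons, List.map_nil, List.sum_cons, List.sum_nil, add_zero]
      rw [d_digitChar_parity m h]
    · rw [Nat.toDigits_of_base_le (by norm_num) (by omega), List.map_append, List.sum_append,
          ih (m / 10) (Nat.div_lt_self (by omega) (by norm_num)), dAltBal_ge h]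
      simp only [List.map_cons, List.map_nil, List.sum_cons, List.sum_nil, add_zero]
      rw [d_digitChar_parity (m % 10) (Nat.mod_lt _ (by norm_num))]
      exact add_comm _ _

-- ===== VERDICT (by name: the statement is the Claim_ definition above) =====
theorem d_spec : Claim_equal_d := by
  intro x _
  show d x = d_alt x
  have habs : PySem.Int.toChars |x| = Nat.toDigits 10 (|x|).toNat := by
    unfold PySem.Int.toChars
    rw [if_neg (not_lt.mpr (abs_nonneg x))]
  simp only [d, d_alt, habs]
  rw [d_fold_counts]
  have hbal : ((Nat.toDigits 10 (|x|).toNat).countP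
        (fun c => decide (PySem.Int.mod ((c.toNat : Int) - 48) 2 = 0)) : Int)
      - ((Nat.toDigits 10 (|x|).toNat).countP
        (fun c => !decide (PySem.Int.mod ((c.toNat : Int) - 48) 2 = 0)) : Int)
      = dAltBal (|x|).toNat := by
    rw [← d_balSum_toDigits (|x|).toNat, d_balSum_counts]
  set e := (Nat.toDigits 10 (|x|).toNat).countP
      (fun c => decide (PySem.Int.mod ((c.toNat : Int) - 48) 2 = 0)) with he
  set o := (Nat.toDigits 10 (|x|).toNat).countP
      (fun c => !decide (PySem.Int.mod ((c.toNat : Int) - 48) 2 = 0)) with ho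
  by_cases h : (0 : Int) + (e : Int) = 0 + (o : Int)
  · rw [if_pos h]
    have h0 : dAltBal (|x|).toNat = 0 := by omega
    simp [h0]
  · rw [if_neg h]
    have h0 : dAltBal (|x|).toNat ≠ 0 := by omega
    simp [h0]
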